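-- pv_equiv track=rewrite | github.com/jhillierdavis/advent-of-code-solutions | aoc-2025/aoc-2025-day-04/solution-in-python3/ai_solution_part_2.py | find_matching_points
-- ===== SOURCE A (Python) =====
-- def find_matching_points(grid: list[list[str]]) -> list[tuple[int, int]]:
--     """
--     Find all '@' points that have fewer than 4 immediate neighbours (including diagonals)
--     also equal to '@'.
--     Returns a list of coordinates (row, col).
--     """
--     rows = len(grid)
--     cols = len(grid[0]) if rows > 0 else 0
--     matches = []
--
--     directions = [
--         (-1, 0), (1, 0), (0, -1), (0, 1),
--         (-1, -1), (-1, 1), (1, -1), (1, 1)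
--     ]
--
--     for r in range(rows):
--         for c in range(cols):
--             if grid[r][c] == "@":
--                 neighbours = 0
--                 for dr, dc in directions:
--                     nr, nc = r + dr, c + dc
--                     if 0 <= nr < rows and 0 <= nc < cols and grid[nr][nc] == "@":
--                         neighbours += 1
--                 if neighbours < 4:
--                     matches.append((r, c))
--     return matches
-- ===== SOURCE B (Python) =====
-- def find_matching_points(grid: list[list[str]]) -> list[tuple[int, int]]:
--     """Scatter pass: each '@' cell adds 1 to a counter at each of its 8 neighbour
--     coordinates; a second row-major pass collects '@' cells whose counter is < 4."""
--     rows = len(grid)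
--     cols = len(grid[0]) if rows > 0 else 0
--     deltas = [(-1, 0), (1, 0), (0, -1), (0, 1),
--               (-1, -1), (-1, 1), (1, -1), (1, 1)]
--     events = [(r + dr, c + dc)
--               for r in range(rows) for c in range(cols)
--               if grid[r][c] == "@"
--               for dr, dc in deltas]
--     counter = {}
--     for k in events:
--         counter[k] = counter.get(k, 0) + 1
--     return [(r, c) for r in range(rows) for c in range(cols)
--             if grid[r][c] == "@" and counter.get((r, c), 0) < 4]
-- ===== Notes on version B (the rewrite author's own statement) =====
-- stated objective: alternative
-- what changed: A gathers: for each '@' cell it scans its 8 neighbours and counts; B scatters: one pass adds 1 to a dict counter at each neighbour coordinate of every '@' cell, then a second row-major pass collects '@' cells whose counter entry is < 4.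
import Mathlib
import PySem

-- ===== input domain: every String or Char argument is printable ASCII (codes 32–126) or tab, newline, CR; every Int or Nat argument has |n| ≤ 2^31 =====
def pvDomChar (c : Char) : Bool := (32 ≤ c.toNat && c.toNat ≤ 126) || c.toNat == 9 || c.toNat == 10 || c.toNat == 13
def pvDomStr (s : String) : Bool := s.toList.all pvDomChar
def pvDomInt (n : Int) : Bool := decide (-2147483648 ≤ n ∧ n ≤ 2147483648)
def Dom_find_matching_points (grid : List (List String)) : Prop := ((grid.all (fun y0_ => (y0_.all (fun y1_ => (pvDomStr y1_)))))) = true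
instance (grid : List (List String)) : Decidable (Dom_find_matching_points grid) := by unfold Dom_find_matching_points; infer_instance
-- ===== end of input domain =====

-- B replaces A's per-cell gather of the 8 neighbours by a scatter pass that increments a
-- dict counter at every neighbour coordinate of each '@' cell, then collects '@' cells with
-- counter < 4 in a second row-major pass (objective: alternative algorithm, same cost).

-- ===== PORT A =====
-- the 8 neighbour offsets, in A's order
def pvDirs : List (Int × Int) := [(-1, 0), (1, 0), (0, -1), (0, 1), (-1, -1), (-1, 1), (1, -1), (1, 1)]

-- grid[r][c]; inside Pre_ the indices used are always in range, so the defaults are never read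
def pvAt (grid : List (List String)) (r c : Int) : String :=
  PySem.List.pyGetD (PySem.List.pyGetD grid r []) c ""

-- '0 <= nr < rows and 0 <= nc < cols'
def pvInB (rows cols : Int) (p : Int × Int) : Bool :=
  decide (0 ≤ p.1) && decide (p.1 < rows) && decide (0 ≤ p.2) && decide (p.2 < cols)

-- A's inner neighbour-counting loop
def pvNbr (grid : List (List String)) (rows cols r c : Int) : Int :=
  pvDirs.foldl (fun n d =>
    if (pvInB rows cols (r + d.1, c + d.2) && (pvAt grid (r + d.1) (c + d.2) == "@")) then n + 1
    else n) 0

def find_matching_points (grid : List (List String)) : List (Int × Int) :=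
  let rows : Int := (grid.length : Int)
  let cols : Int := if grid.length > 0 then ((PySem.List.pyGetD grid 0 []).length : Int) else 0
  (PySem.List.pyRange 0 rows).foldl (fun ms r =>
    (PySem.List.pyRange 0 cols).foldl (fun ms c =>
      if (pvAt grid r c == "@") then
        (if pvNbr grid rows cols r c < 4 then ms ++ [(r, c)] else ms)
      else ms) ms) []

-- ===== PORT B =====
def find_matching_points_alt (grid : List (List String)) : List (Int × Int) :=
  let rows : Int := (grid.length : Int)
  let cols : Int := if grid.length > 0 then ((PySem.List.pyGetD grid 0 []).length : Int) else 0
  let events : List (Int × Int) :=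
    (PySem.List.pyRange 0 rows).flatMap (fun r =>
      (PySem.List.pyRange 0 cols).flatMap (fun c =>
        if (pvAt grid r c == "@") then pvDirs.map (fun d => (r + d.1, c + d.2)) else []))
  let counter : PySem.Dict (Int × Int) Int :=
    events.foldl (fun d k => d.insert k (d.getD k 0 + 1)) PySem.Dict.empty
  (PySem.List.pyRange 0 rows).flatMap (fun r =>
    (PySem.List.pyRange 0 cols).flatMap (fun c =>
      if ((pvAt grid r c == "@") && decide (counter.getD (r, c) 0 < 4)) then [(r, c)] else []))

-- ===== PRECONDITION & SPEC =====
-- Pre_ excludes exactly the ragged grids on which Python A raises IndexError: A reads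
-- grid[r][c] for every c < len(grid[0]), so every row must be at least as long as row 0.
def Pre_find_matching_points (grid : List (List String)) : Prop :=
  ∀ row ∈ grid, (grid.headD []).length ≤ row.length
instance (grid : List (List String)) : Decidable (Pre_find_matching_points grid) := by
  unfold Pre_find_matching_points; infer_instance

def pvWitness_find_matching_points : List (List String) :=
  [["@", ".", "@"], [".", "@", "."], ["@", ".", "@"]]

def Spec_find_matching_points (grid : List (List String)) (out : List (Int × Int)) : Prop :=
  out = find_matching_points_alt grid
instance (grid : List (List String)) (out : List (Int × Int)) : Decidable (Spec_find_matching_points grid out) := by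
  unfold Spec_find_matching_points; infer_instance

-- ===== CLAIM (what is proved, stated in full; the proofs are below) =====
def Claim_equal_find_matching_points : Prop := ∀ (grid : List (List String)), Dom_find_matching_points grid → Pre_find_matching_points grid → Spec_find_matching_points grid (find_matching_points grid)

-- ===== LEMMAS AND PROOFS =====

-- pyRange with the default step 1 has no duplicates
lemma pv_nodup_pyRange (a b : Int) : (PySem.List.pyRange a b).Nodup := by
  rw [PySem.List.pyRange_of_pos a b (by norm_num)]
  exact List.nodup_range.map (fun x y h => by omega)

-- the row-major product list of the two index ranges
def pvProd (rows cols : Int) : List (Int × Int) :=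
  (PySem.List.pyRange 0 rows).flatMap (fun r =>
    (PySem.List.pyRange 0 cols).map (fun c => (r, c)))

lemma pv_mem_pvProd (rows cols : Int) (p : Int × Int) :
    p ∈ pvProd rows cols ↔ 0 ≤ p.1 ∧ p.1 < rows ∧ 0 ≤ p.2 ∧ p.2 < cols := by
  cases p with
  | mk x y =>
    simp only [pvProd, List.mem_flatMap, List.mem_map, PySem.List.mem_pyRange_one, Prod.mk.injEq]
    constructor
    · rintro ⟨r, hr, c, hc, h1, h2⟩; omega
    · rintro ⟨h1, h2, h3, h4⟩
      exact ⟨x, ⟨h1, h2⟩, y, ⟨h3, h4⟩, rfl, rfl⟩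

lemma pv_nodup_pvProd (rows cols : Int) : (pvProd rows cols).Nodup := by
  rw [pvProd, List.nodup_flatMap]
  refine ⟨fun r _ => (pv_nodup_pyRange 0 cols).map (fun x y h => by
      simpa using congrArg Prod.snd h), ?_⟩
  have := pv_nodup_pyRange 0 rows
  refine List.Pairwise.imp ?_ this
  intro r r' hne p hp hp'
  simp only [List.mem_map] at hp hp'
  obtain ⟨c, _, rfl⟩ := hp
  obtain ⟨c', _, h⟩ := hp'
  exact hne (congrArg Prod.fst h.symm)

-- pvDirs is symmetric under negation
lemma pv_dirs_symm (a b : Int) : (a, b) ∈ pvDirs ↔ (-a, -b) ∈ pvDirs := by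
  simp [pvDirs, Prod.ext_iff]; omega

-- membership in the shifted copy of pvDirs
lemma pv_mem_shift (r c : Int) (p : Int × Int) :
    p ∈ pvDirs.map (fun d => (r + d.1, c + d.2)) ↔ (p.1 - r, p.2 - c) ∈ pvDirs := by
  cases p with
  | mk x y =>
    simp only [List.mem_map]
    constructor
    · rintro ⟨d, hd, h⟩
      cases d
      simp only [Prod.ext_iff] at h
      obtain ⟨h1, h2⟩ := h
      simpa [← h1, ← h2] using hd
    · intro h
      exact ⟨(x - r, y - c), h, by simp⟩

lemma pv_nodup_shift (r c : Int) : (pvDirs.map (fun d => (r + d.1, c + d.2))).Nodup := by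
  have : pvDirs.Nodup := by decide
  exact this.map (fun x y h => by
    cases x; cases y
    simp only [Prod.ext_iff] at h ⊢
    omega)

-- counting predicates on two nodup lists that pick out the same set
lemma pv_countP_eq_countP {α : Type} [DecidableEq α] (L M : List α) (q p : α → Bool)
    (hL : L.Nodup) (hM : M.Nodup)
    (h : ∀ x, (x ∈ L ∧ q x = true) ↔ (x ∈ M ∧ p x = true)) :
    L.countP q = M.countP p := by
  have hperm : (L.filter q).Perm (M.filter p) := by
    rw [List.perm_ext_iff_of_nodup (hL.filter q) (hM.filter p)]
    intro a
    simp only [List.mem_filter]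
    exact h a
  simpa [List.countP_eq_length_filter] using hperm.length_eq

-- one term of the scatter: how many events from cell (r',c') land on (r,c)
lemma pv_count_one (f : Int × Int → Bool) (r c r' c' : Int) :
    List.count (r, c) (if f (r', c') then pvDirs.map (fun d => (r' + d.1, c' + d.2)) else [])
    = if (f (r', c') && decide ((r - r', c - c') ∈ pvDirs)) then 1 else 0 := by
  by_cases hf : f (r', c') = true
  · rw [if_pos hf]
    rw [List.Nodup.count (pv_nodup_shift r' c')]
    by_cases hm : ((r, c) : Int × Int) ∈ pvDirs.map (fun d => (r' + d.1, c' + d.2))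
    · have : (r - r', c - c') ∈ pvDirs := by simpa using (pv_mem_shift r' c' (r, c)).1 hm
      simp [hm, hf, this]
    · have : ¬ (r - r', c - c') ∈ pvDirs := fun h => hm ((pv_mem_shift r' c' (r, c)).2 (by simpa using h))
      simp [hm, hf, this]
  · simp [hf]

-- summing the scatter over one row of scanned cells is a countP
lemma pv_inner (f : Int × Int → Bool) (r c r' : Int) (C : List Int) :
    (C.map (List.count (r, c) ∘ (fun c' =>
        if f (r', c') then pvDirs.map (fun d => (r' + d.1, c' + d.2)) else []))).sum
    = C.countP (fun c' => f (r', c') && decide ((r - r', c - c') ∈ pvDirs)) := by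
  induction C with
  | nil => rfl
  | cons c' C ih =>
    simp only [List.map_cons, List.sum_cons, List.countP_cons, ih, Function.comp, pv_count_one]
    by_cases h : (f (r', c') && decide ((r - r', c - c') ∈ pvDirs)) = true <;> simp [h]
    omega

-- THE CORE: the number of scatter events landing on an in-range cell (r,c) equals
-- A's gathered neighbour count at (r,c)
lemma pv_count_events (f : Int × Int → Bool) (rows cols r c : Int) :
    List.count (r, c)
      ((PySem.List.pyRange 0 rows).flatMap (fun r' =>
        (PySem.List.pyRange 0 cols).flatMap (fun c' =>
          if f (r', c') then pvDirs.map (fun d => (r' + d.1, c' + d.2)) else [])))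
    = List.countP (fun d => pvInB rows cols (r + d.1, c + d.2) && f (r + d.1, c + d.2)) pvDirs := by
  -- left side: count over the product list
  have hL : List.count (r, c)
      ((PySem.List.pyRange 0 rows).flatMap (fun r' =>
        (PySem.List.pyRange 0 cols).flatMap (fun c' =>
          if f (r', c') then pvDirs.map (fun d => (r' + d.1, c' + d.2)) else [])))
      = (pvProd rows cols).countP
          (fun p => f p && decide ((r - p.1, c - p.2) ∈ pvDirs)) := by
    rw [List.count_flatMap, pvProd, List.countP_flatMap]
    congr 1
    apply List.map_congr_left
    intro r' _
    simp only [Function.comp]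
    rw [List.count_flatMap, List.countP_map]
    exact pv_inner f r c r' (PySem.List.pyRange 0 cols)
  rw [hL]
  -- right side: countP over the shifted copy of pvDirs
  have hR : List.countP (fun d => pvInB rows cols (r + d.1, c + d.2) && f (r + d.1, c + d.2)) pvDirs
      = (pvDirs.map (fun d => (r + d.1, c + d.2))).countP
          (fun p => pvInB rows cols p && f p) := by
    rw [List.countP_map]; rfl
  rw [hR]
  apply pv_countP_eq_countP _ _ _ _ (pv_nodup_pvProd rows cols) (pv_nodup_shift r c)
  intro p
  rw [pv_mem_pvProd, pv_mem_shift]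
  cases p with
  | mk x y =>
    simp only [Bool.and_eq_true, decide_eq_true_eq, pvInB]
    constructor
    · rintro ⟨hmem, hf, hd⟩
      have hd' : (x - r, y - c) ∈ pvDirs := by
        have := (pv_dirs_symm (r - x) (c - y)).1 hd
        simpa [neg_sub] using this
      refine ⟨hd', by omega, hf⟩
    · rintro ⟨hd, hb, hf⟩
      refine ⟨by omega, hf, ?_⟩
      have := (pv_dirs_symm (x - r) (y - c)).1 hd
      simpa [neg_sub] using this

-- A's inner column loop as filter-then-map
lemma pv_foldl_inner (grid : List (List String)) (rows cols r : Int) (ms : List (Int × Int)) (C : List Int) :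
    C.foldl (fun ms c =>
      if (pvAt grid r c == "@") then
        (if pvNbr grid rows cols r c < 4 then ms ++ [(r, c)] else ms)
      else ms) ms
    = ms ++ (C.filter (fun c => (pvAt grid r c == "@") && decide (pvNbr grid rows cols r c < 4))).map
        (fun c => (r, c)) := by
  have hbody : (fun (ms : List (Int × Int)) (c : Int) =>
      if (pvAt grid r c == "@") then
        (if pvNbr grid rows cols r c < 4 then ms ++ [(r, c)] else ms)
      else ms)
    = (fun ms c =>
      if ((pvAt grid r c == "@") && decide (pvNbr grid rows cols r c < 4)) = true then
        ms ++ [(r, c)] else ms) := by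
    funext ms c
    by_cases h1 : (pvAt grid r c == "@") = true <;> by_cases h2 : pvNbr grid rows cols r c < 4 <;>
      simp [h1, h2]
  rw [hbody, PySem.List.foldl_append_if]

-- B's inner collection comprehension as filter-then-map
lemma pv_flatMap_if (p : Int → Bool) (r : Int) (C : List Int) :
    C.flatMap (fun c => if p c then [(r, c)] else [])
    = (C.filter p).map (fun c => (r, c)) := by
  induction C with
  | nil => rfl
  | cons c C ih =>
    by_cases h : p c = true <;> simp [h, ih]

-- the two programs agree (no precondition needed on the Lean side: both ports read
-- the grid through the same total helper pvAt)
lemma pv_main (grid : List (List String)) :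
    find_matching_points grid = find_matching_points_alt grid := by
  unfold find_matching_points find_matching_points_alt
  simp only [pv_foldl_inner, pv_flatMap_if, PySem.List.foldl_append_eq_flatMap,
    List.nil_append]
  apply List.flatMap_congr
  intro r hr
  congr 1
  apply List.filter_congr
  intro c hc
  by_cases hat : (pvAt grid r c == "@") = true
  · simp only [hat, Bool.true_and]
    congr 1
    have hcnt := pv_count_events (fun p => pvAt grid p.1 p.2 == "@")
      (grid.length : Int)
      (if grid.length > 0 then ((PySem.List.pyGetD grid 0 []).length : Int) else 0)
      r c
    have hget := PySem.Dict.getD_foldl_insert_add_one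
      ((PySem.List.pyRange 0 (grid.length : Int)).flatMap (fun r' =>
        (PySem.List.pyRange 0 (if grid.length > 0 then ((PySem.List.pyGetD grid 0 []).length : Int) else 0)).flatMap (fun c' =>
          if (pvAt grid r' c' == "@") then pvDirs.map (fun d => (r' + d.1, c' + d.2)) else [])))
      PySem.Dict.empty (r, c)
    rw [hget, PySem.Dict.getD_empty, hcnt]
    have hnbr : pvNbr grid (grid.length : Int)
        (if grid.length > 0 then ((PySem.List.pyGetD grid 0 []).length : Int) else 0) r c
      = (List.countP (fun d =>
          pvInB (grid.length : Int) (if grid.length > 0 then ((PySem.List.pyGetD grid 0 []).length : Int) else 0) (r + d.1, c + d.2)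
          && (pvAt grid (r + d.1) (c + d.2) == "@")) pvDirs : Int) := by
      unfold pvNbr
      rw [PySem.List.foldl_count_if]
      simp
    rw [hnbr]
    norm_num
  · simp [hat]

-- ===== VERDICT (by name: the statement is the Claim_ definition above) =====
theorem find_matching_points_spec : Claim_equal_find_matching_points := by
  intro grid _ _
  unfold Spec_find_matching_points
  exact pv_main grid
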